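-- pv_equiv track=rewrite | github.com/cahudson94/code-wars-practice | 5_kyu/2024/jan/krazy_king_blackjack.py | krazy_king_blackjack
-- ===== SOURCE A (Python) =====
-- from itertools import combinations_with_replacement
--
-- def krazy_king_blackjack(hand, king_value):
--     vals = {"2": 2, "3": 3, "4": 4, "5": 5, "6": 6, "7": 7, "8": 8, "9": 9, "10": 10, "J": 10, "Q": 10}
--     hand_val = sum(vals[x] for x in hand if x in vals)
--     ace_count = hand.count("A")
--     king_count = hand.count("K")
--     king_options = []
--     hand_options = []
--     if king_count:
--         for x in combinations_with_replacement((1,0), king_count):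
--             king_options.append(sum(10 if y == 1 else king_value for y in x) + hand_val)
--     if ace_count:
--         for x in combinations_with_replacement((1,0), ace_count):
--             if king_options:
--                 for hand_option in king_options:
--                     hand_options.append(sum(1 if y == 1 else 11 for y in x) + hand_option)
--             else:
--                 hand_options.append(sum(1 if y == 1 else 11 for y in x) + hand_val)
--     if not hand_options:
--         if not king_options:
--             return hand_val if hand_val < 22 else False
--         vals = sorted(x for x in king_options if x < 22)
--     else:
--         vals = sorted(x for x in hand_options if x < 22)
--     return vals[-1] if vals else False
-- ===== SOURCE B (Python) =====
-- def krazy_king_blackjack(hand, king_value):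
--     vals = {"2": 2, "3": 3, "4": 4, "5": 5, "6": 6, "7": 7, "8": 8, "9": 9, "10": 10, "J": 10, "Q": 10}
--     base = sum(vals.get(x, 0) for x in hand)
--     aces = hand.count("A")
--     kings = hand.count("K")
--     best = None
--     for tens in range(kings + 1):
--         low = base + 10 * tens + king_value * (kings - tens) + aces
--         if low < 22:
--             t = low + 10 * min(aces, (21 - low) // 10)
--             if best is None or t > best:
--                 best = t
--     return best if best is not None else False
-- ===== Notes on version B (the rewrite author's own statement) =====
-- stated objective: alternative
-- what changed: Replaces A's enumeration of every ace/king 0-1 tuple (summed one by one) followed by filter-and-sort with a single loop over king splits that computes the best admissible ace upgrade count by a closed floor-division formula, keeping a running maximum; on the timed inputs both are dominated by the same linear scan of the hand.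
-- outside the precondition, e.g. on krazy_king_blackjack(['K', 'Q', 'Q'], 12): A returns False, B returns False
import Mathlib
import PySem

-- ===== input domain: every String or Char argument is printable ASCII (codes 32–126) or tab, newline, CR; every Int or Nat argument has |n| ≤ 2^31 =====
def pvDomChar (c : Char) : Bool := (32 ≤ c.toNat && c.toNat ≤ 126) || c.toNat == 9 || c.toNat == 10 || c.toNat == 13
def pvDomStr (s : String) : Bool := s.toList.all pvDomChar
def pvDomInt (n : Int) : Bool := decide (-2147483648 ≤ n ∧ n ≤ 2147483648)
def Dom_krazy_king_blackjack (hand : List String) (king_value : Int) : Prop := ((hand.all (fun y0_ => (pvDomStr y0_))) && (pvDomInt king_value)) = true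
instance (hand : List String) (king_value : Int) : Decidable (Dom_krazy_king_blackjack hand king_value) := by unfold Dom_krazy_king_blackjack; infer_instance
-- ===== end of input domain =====

-- B replaces A's enumeration of every ace/king 0-1 tuple plus filter-and-sort by one loop over king
-- splits with a closed-form best ace count (objective: alternative).

-- ===== PORT A =====
-- the card-value dict literal (it appears identically in Source A and Source B)
def pvVals : PySem.Dict String Int :=
  PySem.Dict.ofList [("2",2),("3",3),("4",4),("5",5),("6",6),("7",7),("8",8),("9",9),("10",10),("J",10),("Q",10)]

-- exact model of combinations_with_replacement((1,0), n): the tuple with z zeros is (n-z) ones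
-- followed by z zeros, produced for z = 0..n in this order
def pvCWR10 (n : Nat) : List (List Int) :=
  (List.range (n+1)).map (fun z => List.replicate (n - z) (1:Int) ++ List.replicate z 0)

-- where the Python returns the bool False (no admissible total) the port returns 0; those inputs are outside Pre_
def krazy_king_blackjack (hand : List String) (king_value : Int) : Int :=
  let hand_val := hand.foldl (fun acc x => match PySem.Dict.get? pvVals x with | some v => acc + v | none => acc) 0
  let ace_count := PySem.List.count hand "A"
  let king_count := PySem.List.count hand "K"
  let king_options : List Int :=
    if king_count ≠ 0 then
      (pvCWR10 king_count).foldl (fun acc x =>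
        acc ++ [x.foldl (fun s y => s + (if y == 1 then 10 else king_value)) 0 + hand_val]) []
    else []
  let hand_options : List Int :=
    if ace_count ≠ 0 then
      (pvCWR10 ace_count).foldl (fun acc x =>
        if king_options ≠ [] then
          king_options.foldl (fun acc2 ho =>
            acc2 ++ [x.foldl (fun s y => s + (if y == 1 then (1:Int) else 11)) 0 + ho]) acc
        else
          acc ++ [x.foldl (fun s y => s + (if y == 1 then (1:Int) else 11)) 0 + hand_val]) []
    else []
  if hand_options = [] then
    if king_options = [] then (if hand_val < 22 then hand_val else 0)
    else
      let vs := PySem.List.sorted (king_options.filter (fun x => decide (x < 22))) (fun x => x) false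
      match PySem.List.pyGet? vs (-1) with | some v => v | none => 0
  else
    let vs := PySem.List.sorted (hand_options.filter (fun x => decide (x < 22))) (fun x => x) false
    match PySem.List.pyGet? vs (-1) with | some v => v | none => 0

-- ===== PORT B =====
def krazy_king_blackjack_alt (hand : List String) (king_value : Int) : Int :=
  let base := (hand.map (fun x => (PySem.Dict.get? pvVals x).getD 0)).sum
  let aces : Int := PySem.List.count hand "A"
  let kings : Int := PySem.List.count hand "K"
  let best := (PySem.List.pyRange 0 (kings + 1) 1).foldl (fun best tens =>
      let low := base + 10 * tens + king_value * (kings - tens) + aces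
      if low < 22 then
        let t := low + 10 * min aces (PySem.Int.floordiv (21 - low) 10)
        match best with
        | none => some t
        | some b => if t > b then some t else some b
      else best) (none : Option Int)
  match best with | some b => b | none => 0

-- ===== PRECONDITION & SPEC =====
-- Pre_ excludes exactly the hands whose minimal achievable total is already ≥ 22: on those A returns
-- the bool False instead of an int (and B does the same), so no integer value can be claimed there.
def Pre_krazy_king_blackjack (hand : List String) (king_value : Int) : Prop :=
  (hand.map (fun x => (PySem.Dict.get? pvVals x).getD 0)).sum
    + (PySem.List.count hand "A" : Int)
    + (PySem.List.count hand "K" : Int) * min 10 king_value < 22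
instance (hand : List String) (king_value : Int) : Decidable (Pre_krazy_king_blackjack hand king_value) := by
  unfold Pre_krazy_king_blackjack; infer_instance
def pvWitness_krazy_king_blackjack : List String × Int := (["A", "K", "5"], 10)

def Spec_krazy_king_blackjack (hand : List String) (king_value : Int) (out : Int) : Prop := out = krazy_king_blackjack_alt hand king_value
instance (hand : List String) (king_value : Int) (out : Int) : Decidable (Spec_krazy_king_blackjack hand king_value out) := by unfold Spec_krazy_king_blackjack; infer_instance

-- ===== CLAIM (what is proved, stated in full; the proofs are below) =====
def Claim_equal_krazy_king_blackjack : Prop := ∀ (hand : List String) (king_value : Int), Dom_krazy_king_blackjack hand king_value → Pre_krazy_king_blackjack hand king_value → Spec_krazy_king_blackjack hand king_value (krazy_king_blackjack hand king_value)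

-- ===== LEMMAS AND PROOFS =====

-- the total when i kings count 10 (the other k-i count king_value) and j aces count 11 (the other a-j count 1)
def pvF (b v : Int) (k a : Nat) (i j : Nat) : Int :=
  b + 10 * (i : Int) + v * ((k : Int) - (i : Int)) + (a : Int) + 10 * (j : Int)

-- the admissible totals
def pvGood (b v : Int) (k a : Nat) (x : Int) : Prop :=
  (∃ i ≤ k, ∃ j ≤ a, x = pvF b v k a i j) ∧ x < 22

def pvIsMax (P : Int → Prop) (m : Int) : Prop := P m ∧ ∀ x, P x → x ≤ m

theorem pvIsMax_unique {P : Int → Prop} {m m' : Int} (h : pvIsMax P m) (h' : pvIsMax P m') : m = m' :=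
  le_antisymm (h'.2 m h.1) (h.2 m' h'.1)

theorem pv_base_eq (l : List String) (c : Int) :
    l.foldl (fun acc x => match PySem.Dict.get? pvVals x with | some v => acc + v | none => acc) c
      = c + (l.map (fun x => (PySem.Dict.get? pvVals x).getD 0)).sum := by
  induction l generalizing c with
  | nil => simp
  | cons x t ih =>
    simp only [List.foldl_cons, List.map_cons, List.sum_cons, ih]
    cases PySem.Dict.get? pvVals x
    · simp
    · simp; ring

theorem pv_foldl_replicate {α} (g : α → Int) (w : α) (m : Nat) (c : Int) :
    (List.replicate m w).foldl (fun s y => s + g y) c = c + (m : Int) * g w := by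
  induction m generalizing c with
  | zero => simp
  | succ n ih => simp [List.replicate_succ, ih]; ring

theorem pv_king_sum (v : Int) (n z : Nat) (hz : z ≤ n) :
    (List.replicate (n - z) (1:Int) ++ List.replicate z 0).foldl
        (fun s y => s + (if y == 1 then 10 else v)) 0
      = 10 * ((n : Int) - (z : Int)) + v * (z : Int) := by
  rw [List.foldl_append, pv_foldl_replicate, pv_foldl_replicate]
  have h0 : ((0:Int) == 1) = false := by decide
  simp [h0]
  push_cast [hz]
  ring

theorem pv_ace_sum (n z : Nat) (hz : z ≤ n) :
    (List.replicate (n - z) (1:Int) ++ List.replicate z 0).foldl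
        (fun s y => s + (if y == 1 then (1:Int) else 11)) 0
      = (n : Int) + 10 * (z : Int) := by
  rw [List.foldl_append, pv_foldl_replicate, pv_foldl_replicate]
  have h0 : ((0:Int) == 1) = false := by decide
  simp [h0]
  push_cast [hz]
  ring

theorem pv_pairwise_le_getLast (l : List Int) (h : l ≠ []) (hp : l.Pairwise (· ≤ ·)) :
    ∀ x ∈ l, x ≤ l.getLast h := by
  induction l with
  | nil => simp at h
  | cons y t ih =>
    intro x hx
    cases t with
    | nil => simp at hx; simp [hx, List.getLast]
    | cons z s =>
      rw [List.getLast_cons (by simp)]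
      rcases List.mem_cons.mp hx with rfl | hxt
      · exact le_trans (List.rel_of_pairwise_cons hp (List.getLast_mem _)) (le_refl _)
      · exact ih (by simp) hp.of_cons x hxt

-- A's "sorted(filter)[-1]" is the maximum of the admissible elements of l
theorem pv_pick_max (l : List Int) (P : Int → Prop)
    (hiff : ∀ x, P x ↔ (x ∈ l ∧ x < 22)) (hne : ∃ x, P x) :
    pvIsMax P ((match PySem.List.pyGet? (PySem.List.sorted (l.filter (fun x => decide (x < 22))) (fun x => x) false) (-1) with
                | some v => v | none => 0)) := by
  obtain ⟨w, hw⟩ := hne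
  have hmemF : ∀ x, x ∈ l.filter (fun x => decide (x < 22)) ↔ (x ∈ l ∧ x < 22) := by
    intro x; simp
  have hwF : w ∈ l.filter (fun x => decide (x < 22)) := (hmemF w).mpr ((hiff w).mp hw)
  have hperm : (PySem.List.sorted (l.filter (fun x => decide (x < 22))) (fun x => x) false).Perm
      (l.filter (fun x => decide (x < 22))) := PySem.List.sorted_perm _ _ _
  have hSne : PySem.List.sorted (l.filter (fun x => decide (x < 22))) (fun x => x) false ≠ [] := by
    intro h
    rw [h] at hperm
    exact (List.not_mem_nil (a := w)) (hperm.mem_iff.mpr hwF)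
  have hget : PySem.List.pyGet? (PySem.List.sorted (l.filter (fun x => decide (x < 22))) (fun x => x) false) (-1)
      = some ((PySem.List.sorted (l.filter (fun x => decide (x < 22))) (fun x => x) false).getLast hSne) := by
    rw [PySem.List.pyGet?_neg_one, List.getLast?_eq_some_getLast hSne]
  rw [hget]
  have hpw : (PySem.List.sorted (l.filter (fun x => decide (x < 22))) (fun x => x) false).Pairwise (· ≤ ·) :=
    PySem.List.sorted_pairwise _ _
  have hmax := pv_pairwise_le_getLast _ hSne hpw
  have hlast_mem := List.getLast_mem hSne
  constructor
  · exact (hiff _).mpr ((hmemF _).mp (hperm.mem_iff.mp hlast_mem))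
  · intro x hx
    exact hmax x (hperm.mem_iff.mpr ((hmemF x).mpr ((hiff x).mp hx)))

theorem pv_row_max (low : Int) (a : Nat) (hlow : low < 22) :
    (∃ j ≤ a, low + 10 * min (a : Int) (PySem.Int.floordiv (21 - low) 10) = low + 10 * (j : Int)) ∧
    low + 10 * min (a : Int) (PySem.Int.floordiv (21 - low) 10) < 22 ∧
    ∀ j : Nat, j ≤ a → low + 10 * (j : Int) < 22 →
      low + 10 * (j : Int) ≤ low + 10 * min (a : Int) (PySem.Int.floordiv (21 - low) 10) := by
  have hq : PySem.Int.floordiv (21 - low) 10 = (21 - low) / 10 :=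
    PySem.Int.floordiv_eq_ediv_of_pos (by norm_num)
  rw [hq]
  have hqr := Int.mul_ediv_add_emod (21 - low) 10
  have hr0 := Int.emod_nonneg (21 - low) (by norm_num : (10:Int) ≠ 0)
  have hr1 := Int.emod_lt_of_pos (21 - low) (by norm_num : (0:Int) < 10)
  have hq0 : 0 ≤ (21 - low) / 10 := Int.ediv_nonneg (by omega) (by norm_num)
  rcases le_total ((a : Int)) ((21 - low) / 10) with hle | hle
  · rw [min_eq_left hle]
    refine ⟨⟨a, le_refl _, rfl⟩, by omega, ?_⟩
    intro j hj _
    have : (j : Int) ≤ (a : Int) := by exact_mod_cast hj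
    omega
  · rw [min_eq_right hle]
    refine ⟨⟨((21 - low) / 10).toNat, by omega, by rw [Int.toNat_of_nonneg hq0]⟩, by omega, ?_⟩
    intro j hj hlt
    omega

def pvInv (b v : Int) (k a n : Nat) (o : Option Int) : Prop :=
  match o with
  | none => ∀ i < n, ∀ j ≤ a, ¬ (pvF b v k a i j < 22)
  | some m => m < 22 ∧ (∃ i < n, ∃ j ≤ a, m = pvF b v k a i j) ∧
      ∀ i < n, ∀ j ≤ a, pvF b v k a i j < 22 → pvF b v k a i j ≤ m

theorem pv_foldB (b v : Int) (k a : Nat) (n : Nat) :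
    pvInv b v k a n ((List.range n).foldl
      (fun best (tn : Nat) =>
        let tens : Int := tn
        let low := b + 10 * tens + v * ((k : Int) - tens) + (a : Int)
        if low < 22 then
          let t := low + 10 * min (a : Int) (PySem.Int.floordiv (21 - low) 10)
          match best with
          | none => some t
          | some bb => if t > bb then some t else some bb
        else best) none) := by
  induction n with
  | zero => intro i hi; omega
  | succ n ih =>
    rw [List.range_succ, List.foldl_append]
    set G := (fun (best : Option Int) (tn : Nat) =>
        let tens : Int := tn
        let low := b + 10 * tens + v * ((k : Int) - tens) + (a : Int)
        if low < 22 then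
          let t := low + 10 * min (a : Int) (PySem.Int.floordiv (21 - low) 10)
          match best with
          | none => some t
          | some bb => if t > bb then some t else some bb
        else best) with hG
    set o := (List.range n).foldl G none with ho
    have hrow : ∀ j : Nat, pvF b v k a n j
        = (b + 10 * (n : Int) + v * ((k : Int) - (n : Int)) + (a : Int)) + 10 * (j : Int) := by
      intro j; unfold pvF; ring
    simp only [List.foldl_cons, List.foldl_nil]
    rw [hG]
    simp only []
    set low := b + 10 * (n : Int) + v * ((k : Int) - (n : Int)) + (a : Int) with hlow
    by_cases hl : low < 22
    · simp only [if_pos hl]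
      obtain ⟨⟨jm, hjm, hjmt⟩, ht22, hbnd⟩ := pv_row_max low a hl
      set t := low + 10 * min (a : Int) (PySem.Int.floordiv (21 - low) 10) with htdef
      cases hoc : o with
      | none =>
        rw [hoc] at ih
        refine ⟨ht22, ⟨n, by omega, jm, hjm, by rw [hrow, hjmt]⟩, ?_⟩
        intro i hi j hj hlt
        rcases Nat.lt_succ_iff_lt_or_eq.mp hi with hi' | rfl
        · exact absurd hlt (ih i hi' j hj)
        · rw [hrow] at hlt ⊢; exact hbnd j hj hlt
      | some m =>
        rw [hoc] at ih
        obtain ⟨hm22, ⟨im, him, jm', hjm', hmeq⟩, hmb⟩ := ih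
        by_cases htm : t > m
        · simp only [if_pos htm]
          refine ⟨ht22, ⟨n, by omega, jm, hjm, by rw [hrow, hjmt]⟩, ?_⟩
          intro i hi j hj hlt
          rcases Nat.lt_succ_iff_lt_or_eq.mp hi with hi' | rfl
          · exact le_trans (hmb i hi' j hj hlt) (le_of_lt htm)
          · rw [hrow] at hlt ⊢; exact hbnd j hj hlt
        · simp only [if_neg htm]
          refine ⟨hm22, ⟨im, by omega, jm', hjm', hmeq⟩, ?_⟩
          intro i hi j hj hlt
          rcases Nat.lt_succ_iff_lt_or_eq.mp hi with hi' | rfl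
          · exact hmb i hi' j hj hlt
          · rw [hrow] at hlt ⊢
            exact le_trans (hbnd j hj hlt) (by omega)
    · simp only [if_neg hl]
      have hnone : ∀ j : Nat, j ≤ a → ¬ (pvF b v k a n j < 22) := by
        intro j _ hlt
        rw [hrow] at hlt
        have : (0:Int) ≤ (j:Int) := Int.natCast_nonneg j
        omega
      cases hoc : o with
      | none =>
        rw [hoc] at ih
        intro i hi j hj
        rcases Nat.lt_succ_iff_lt_or_eq.mp hi with hi' | rfl
        · exact ih i hi' j hj
        · exact hnone j hj
      | some m =>
        rw [hoc] at ih
        obtain ⟨hm22, ⟨im, him, jm', hjm', hmeq⟩, hmb⟩ := ih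
        refine ⟨hm22, ⟨im, by omega, jm', hjm', hmeq⟩, ?_⟩
        intro i hi j hj hlt
        rcases Nat.lt_succ_iff_lt_or_eq.mp hi with hi' | rfl
        · exact hmb i hi' j hj hlt
        · exact absurd hlt (hnone j hj)

-- the minimal achievable total is achieved at j = 0 and i = k (if 10 ≤ v) or i = 0 (else)
theorem pv_pre_witness (hand : List String) (v : Int)
    (hpre : Pre_krazy_king_blackjack hand v) :
    ∃ i ≤ PySem.List.count hand "K",
      pvF ((hand.map (fun x => (PySem.Dict.get? pvVals x).getD 0)).sum) v
        (PySem.List.count hand "K") (PySem.List.count hand "A") i 0 < 22 := by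
  unfold Pre_krazy_king_blackjack at hpre
  set b := (hand.map (fun x => (PySem.Dict.get? pvVals x).getD 0)).sum with hb
  set K := PySem.List.count hand "K" with hK
  set A := PySem.List.count hand "A" with hA
  rcases le_total (10 : Int) v with hv | hv
  · refine ⟨K, le_refl _, ?_⟩
    rw [min_eq_left hv] at hpre
    simp [pvF]; omega
  · refine ⟨0, Nat.zero_le _, ?_⟩
    rw [min_eq_right hv] at hpre
    have hc : v * ((K : Nat) : Int) = ((K : Nat) : Int) * v := mul_comm _ _
    simp [pvF]
    omega

theorem pv_kingopts_eq (v b : Int) (K : Nat) :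
    (pvCWR10 K).foldl (fun acc x =>
        acc ++ [x.foldl (fun s y => s + (if y == 1 then 10 else v)) 0 + b]) []
      = (List.range (K+1)).map
          (fun z => (List.replicate (K - z) (1:Int) ++ List.replicate z 0).foldl
              (fun s y => s + (if y == 1 then 10 else v)) 0 + b) := by
  rw [PySem.List.foldl_append_singleton_eq_map]
  simp [pvCWR10, List.map_map, Function.comp]

theorem pv_mem_kingopts (v b : Int) (K : Nat) (x : Int) :
    x ∈ (pvCWR10 K).foldl (fun acc x =>
        acc ++ [x.foldl (fun s y => s + (if y == 1 then 10 else v)) 0 + b]) []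
    ↔ ∃ z ≤ K, x = 10 * ((K : Int) - (z : Int)) + v * (z : Int) + b := by
  rw [pv_kingopts_eq]
  simp only [List.mem_map, List.mem_range]
  constructor
  · rintro ⟨z, hz, rfl⟩
    exact ⟨z, by omega, by rw [pv_king_sum v K z (by omega)]⟩
  · rintro ⟨z, hz, rfl⟩
    exact ⟨z, by omega, by rw [pv_king_sum v K z hz]⟩

theorem pv_aceopts_eq (c : Int) (A : Nat) (f : List Int → Int) :
    (pvCWR10 A).foldl (fun acc x => acc ++ [f x + c]) []
      = (List.range (A+1)).map
          (fun z => f (List.replicate (A - z) (1:Int) ++ List.replicate z 0) + c) := by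
  rw [PySem.List.foldl_append_singleton_eq_map]
  simp [pvCWR10, List.map_map, Function.comp]

theorem pv_portA_isMax (hand : List String) (v : Int)
    (hpre : Pre_krazy_king_blackjack hand v) :
    pvIsMax (pvGood ((hand.map (fun x => (PySem.Dict.get? pvVals x).getD 0)).sum) v
              (PySem.List.count hand "K") (PySem.List.count hand "A"))
      (krazy_king_blackjack hand v) := by
  obtain ⟨iw, hiw, hltw⟩ := pv_pre_witness hand v hpre
  simp only [krazy_king_blackjack]
  rw [pv_base_eq]
  simp only [zero_add]
  generalize hbg : (hand.map (fun x => (PySem.Dict.get? pvVals x).getD 0)).sum = b at hltw ⊢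
  generalize hKg : PySem.List.count hand "K" = K at hltw hiw ⊢
  generalize hAg : PySem.List.count hand "A" = A at hltw ⊢
  have hne : ∃ x, pvGood b v K A x :=
    ⟨pvF b v K A iw 0, ⟨iw, hiw, 0, Nat.zero_le _, rfl⟩, hltw⟩
  clear hbg hKg hAg hpre
  by_cases hK0 : K = 0
  · subst hK0
    simp only [ne_eq, not_true_eq_false, if_false, reduceIte]
    by_cases hA0 : A = 0
    · subst hA0
      simp only [ne_eq, not_true_eq_false, if_false, reduceIte]
      have hb22 : b < 22 := by
        have : iw = 0 := by omega
        subst this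
        simpa [pvF] using hltw
      rw [if_pos hb22]
      constructor
      · exact ⟨⟨0, le_refl _, 0, le_refl _, by simp [pvF]⟩, hb22⟩
      · rintro x ⟨⟨i, hi, j, hj, rfl⟩, _⟩
        have : i = 0 := by omega
        have hj0 : j = 0 := by omega
        subst this; subst hj0
        simp [pvF]
      -- K = 0, A ≠ 0: only ace options, added to hand_val
    · rw [if_pos hA0]
      rw [pv_aceopts_eq b A (fun x => x.foldl (fun s y => s + (if y == 1 then (1:Int) else 11)) 0)]
      have hLne : ((List.range (A+1)).map
          (fun z => (List.replicate (A - z) (1:Int) ++ List.replicate z 0).foldl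
              (fun s y => s + (if y == 1 then (1:Int) else 11)) 0 + b)) ≠ [] := by
        simp
      rw [if_neg hLne]
      apply pv_pick_max _ _ _ hne
      intro x
      unfold pvGood
      simp only [List.mem_map, List.mem_range]
      constructor
      · rintro ⟨⟨i, hi, j, hj, rfl⟩, h22⟩
        have hi0 : i = 0 := by omega
        subst hi0
        refine ⟨⟨j, by omega, ?_⟩, h22⟩
        rw [pv_ace_sum A j hj]
        simp [pvF]; ring
      · rintro ⟨⟨z, hz, rfl⟩, h22⟩
        have hz' : z ≤ A := by omega
        rw [pv_ace_sum A z hz'] at h22 ⊢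
        refine ⟨⟨0, le_refl _, z, hz', ?_⟩, h22⟩
        simp [pvF]; ring
  · rw [if_pos hK0]
    have hKOne : ((pvCWR10 K).foldl (fun acc x =>
        acc ++ [x.foldl (fun s y => s + (if y == 1 then 10 else v)) 0 + b]) []) ≠ [] := by
      rw [pv_kingopts_eq]; simp
    by_cases hA0 : A = 0
    · subst hA0
      simp only [ne_eq, not_true_eq_false, if_false, reduceIte]
      rw [if_neg hKOne]
      apply pv_pick_max _ _ _ hne
      intro x
      unfold pvGood
      rw [pv_mem_kingopts]
      constructor
      · rintro ⟨⟨i, hi, j, hj, rfl⟩, h22⟩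
        have hj0 : j = 0 := by omega
        subst hj0
        refine ⟨⟨K - i, by omega, ?_⟩, h22⟩
        have : ((K - i : Nat) : Int) = (K : Int) - (i : Int) := by omega
        rw [this]
        simp [pvF]; ring
      · rintro ⟨⟨z, hz, rfl⟩, h22⟩
        refine ⟨⟨K - z, by omega, 0, le_refl _, ?_⟩, h22⟩
        have : ((K - z : Nat) : Int) = (K : Int) - (z : Int) := by omega
        simp [pvF, this]; ring
    · rw [if_pos hA0]
      simp only [if_pos hKOne]
      have hinner : ∀ (acc : List Int) (c : Int),
          ((pvCWR10 K).foldl (fun acc x =>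
            acc ++ [x.foldl (fun s y => s + (if y == 1 then 10 else v)) 0 + b]) []).foldl
            (fun acc2 ho => acc2 ++ [c + ho]) acc
          = acc ++ ((pvCWR10 K).foldl (fun acc x =>
            acc ++ [x.foldl (fun s y => s + (if y == 1 then 10 else v)) 0 + b]) []).map
              (fun ho => c + ho) := by
        intro acc c
        rw [PySem.List.foldl_append_singleton_eq_map]
      have hfun : (fun (acc : List Int) (x : List Int) =>
          ((pvCWR10 K).foldl (fun acc x =>
            acc ++ [x.foldl (fun s y => s + (if y == 1 then 10 else v)) 0 + b]) []).foldl
            (fun acc2 ho => acc2 ++ [x.foldl (fun s y => s + (if y == 1 then (1:Int) else 11)) 0 + ho]) acc)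
          = (fun (acc : List Int) (x : List Int) =>
            acc ++ ((pvCWR10 K).foldl (fun acc x =>
              acc ++ [x.foldl (fun s y => s + (if y == 1 then 10 else v)) 0 + b]) []).map
                (fun ho => x.foldl (fun s y => s + (if y == 1 then (1:Int) else 11)) 0 + ho)) := by
        funext acc x
        exact hinner acc _
      rw [hfun, PySem.List.foldl_append_eq_flatMap]
      simp only [List.nil_append]
      obtain ⟨ko, hko⟩ := List.exists_mem_of_ne_nil _ hKOne
      have hHne : ((pvCWR10 A).flatMap (fun x =>
          ((pvCWR10 K).foldl (fun acc x =>
            acc ++ [x.foldl (fun s y => s + (if y == 1 then 10 else v)) 0 + b]) []).map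
              (fun ho => x.foldl (fun s y => s + (if y == 1 then (1:Int) else 11)) 0 + ho))) ≠ [] := by
        apply List.ne_nil_of_mem (a := (List.replicate (A - 0) (1:Int) ++ List.replicate 0 0).foldl
            (fun s y => s + (if y == 1 then (1:Int) else 11)) 0 + ko)
        rw [List.mem_flatMap]
        refine ⟨List.replicate (A - 0) (1:Int) ++ List.replicate 0 0, ?_, ?_⟩
        · simp only [pvCWR10, List.mem_map, List.mem_range]
          exact ⟨0, by omega, rfl⟩
        · exact List.mem_map_of_mem hko
      rw [if_neg hHne]
      apply pv_pick_max _ _ _ hne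
      intro x
      unfold pvGood
      rw [List.mem_flatMap]
      constructor
      · rintro ⟨⟨i, hi, j, hj, rfl⟩, h22⟩
        refine ⟨⟨List.replicate (A - j) (1:Int) ++ List.replicate j 0, ?_, ?_⟩, h22⟩
        · simp only [pvCWR10, List.mem_map, List.mem_range]
          exact ⟨j, by omega, rfl⟩
        · rw [List.mem_map]
          refine ⟨10 * ((K : Int) - ((K - i : Nat) : Int)) + v * ((K - i : Nat) : Int) + b, ?_, ?_⟩
          · rw [pv_mem_kingopts]
            exact ⟨K - i, by omega, rfl⟩
          · rw [pv_ace_sum A j hj]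
            have hc : ((K - i : Nat) : Int) = (K : Int) - (i : Int) := by omega
            rw [hc]
            simp [pvF]; ring
      · rintro ⟨⟨t, ht, hx⟩, h22⟩
        rw [List.mem_map] at hx
        obtain ⟨ko', hko', rfl⟩ := hx
        rw [pv_mem_kingopts] at hko'
        obtain ⟨z', hz', rfl⟩ := hko'
        simp only [pvCWR10, List.mem_map, List.mem_range] at ht
        obtain ⟨z, hz, rfl⟩ := ht
        rw [pv_ace_sum A z (by omega)] at h22 ⊢
        refine ⟨⟨K - z', by omega, z, by omega, ?_⟩, h22⟩
        have hc : ((K - z' : Nat) : Int) = (K : Int) - (z' : Int) := by omega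
        simp [pvF, hc]; ring

theorem pv_portB_isMax (hand : List String) (v : Int)
    (hpre : Pre_krazy_king_blackjack hand v) :
    pvIsMax (pvGood ((hand.map (fun x => (PySem.Dict.get? pvVals x).getD 0)).sum) v
              (PySem.List.count hand "K") (PySem.List.count hand "A"))
      (krazy_king_blackjack_alt hand v) := by
  obtain ⟨iw, hiw, hltw⟩ := pv_pre_witness hand v hpre
  simp only [krazy_king_blackjack_alt]
  set b := (hand.map (fun x => (PySem.Dict.get? pvVals x).getD 0)).sum with hb
  set K := PySem.List.count hand "K" with hK
  set A := PySem.List.count hand "A" with hA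
  have hrange : PySem.List.pyRange 0 ((K : Int) + 1) 1
      = (List.range (K + 1)).map (fun j : Nat => (j : Int)) := by
    rw [PySem.List.pyRange_one]
    norm_num
  rw [hrange, List.foldl_map]
  have hinv := pv_foldB b v K A (K + 1)
  simp only [] at hinv ⊢
  cases hres : (List.range (K + 1)).foldl
      (fun (best : Option Int) (tn : Nat) =>
        if b + 10 * (tn : Int) + v * ((K : Int) - (tn : Int)) + (A : Int) < 22 then
          match best with
          | none => some (b + 10 * (tn : Int) + v * ((K : Int) - (tn : Int)) + (A : Int)
              + 10 * min (A : Int) (PySem.Int.floordiv (21 - (b + 10 * (tn : Int) + v * ((K : Int) - (tn : Int)) + (A : Int))) 10))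
          | some bb => if b + 10 * (tn : Int) + v * ((K : Int) - (tn : Int)) + (A : Int)
              + 10 * min (A : Int) (PySem.Int.floordiv (21 - (b + 10 * (tn : Int) + v * ((K : Int) - (tn : Int)) + (A : Int))) 10) > bb
              then some (b + 10 * (tn : Int) + v * ((K : Int) - (tn : Int)) + (A : Int)
              + 10 * min (A : Int) (PySem.Int.floordiv (21 - (b + 10 * (tn : Int) + v * ((K : Int) - (tn : Int)) + (A : Int))) 10))
              else some bb
        else best) none with
  | none =>
    rw [hres] at hinv
    have hvF : pvF b v K A iw 0 = b + 10 * (iw : Int) + v * ((K : Int) - (iw : Int)) + (A : Int) := by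
      unfold pvF; push_cast; ring
    exact absurd hltw (hinv iw (by omega) 0 (Nat.zero_le _))
  | some m =>
    rw [hres] at hinv
    obtain ⟨hm22, ⟨im, him, jm, hjm, hmeq⟩, hmb⟩ := hinv
    constructor
    · exact ⟨⟨im, by omega, jm, hjm, hmeq⟩, hm22⟩
    · rintro x ⟨⟨i, hi, j, hj, rfl⟩, hx22⟩
      exact hmb i (by omega) j hj hx22

-- ===== VERDICT (by name: the statement is the Claim_ definition above) =====
theorem krazy_king_blackjack_spec : Claim_equal_krazy_king_blackjack := by
  intro hand v _ hpre
  unfold Spec_krazy_king_blackjack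
  exact pvIsMax_unique (pv_portA_isMax hand v hpre) (pv_portB_isMax hand v hpre)
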